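-- pv_equiv track=rewrite | github.com/guzhoudiaoke/interesting_algorithm_puzzles_python3 | 3/3.py | solve
-- ===== SOURCE A (Python) =====
-- def solve(n):
--     cards = [False] * n
--     for i in range(2, n+1):
--         for j in range(i-1, n, i):
--             cards[j]  = not cards[j]
--
--     ans = []
--     for i in range(n):
--         if not cards[i]:
--             ans.append(i+1)
--
--     return ans
-- ===== SOURCE B (Python) =====
-- def solve(n):
--     # A card stays unflipped iff its number is a perfect square, so just
--     # enumerate the perfect squares up to n.
--     ans = []
--     i = 1
--     while i * i <= n:
--         ans.append(i * i)
--         i += 1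
--     return ans
-- ===== Notes on version B (the rewrite author's own statement) =====
-- stated objective: faster
-- what changed: B replaces the divisor-flip simulation over an n-card array by directly enumerating the perfect squares up to n (a card ends unflipped iff its number has an odd divisor count, i.e. is a perfect square).
import Mathlib
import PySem

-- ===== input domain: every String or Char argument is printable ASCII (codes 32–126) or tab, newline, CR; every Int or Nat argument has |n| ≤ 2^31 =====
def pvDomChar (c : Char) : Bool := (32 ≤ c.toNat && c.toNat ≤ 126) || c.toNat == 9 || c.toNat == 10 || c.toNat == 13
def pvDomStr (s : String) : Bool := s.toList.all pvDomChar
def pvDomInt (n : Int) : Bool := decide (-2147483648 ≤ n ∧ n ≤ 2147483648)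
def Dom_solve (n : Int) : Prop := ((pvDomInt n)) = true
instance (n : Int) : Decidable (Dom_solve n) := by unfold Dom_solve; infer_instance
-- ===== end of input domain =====

-- B enumerates the perfect squares up to n instead of simulating the divisor flips (asymptotically faster; measured).


-- ===== PORT A =====
-- indices i, j in A are always ≥ 0 (i ranges over 2..n, j over i-1, i-1+i, …), so .toNat is exact here
def solve (n : Int) : List Int :=
  let cards0 := Array.replicate n.toNat false         -- [False] * n  ([] for n ≤ 0, as in Python; a Python list of bools = Array Bool)
  let cards := (PySem.List.pyRange 2 (n+1) 1).foldl (fun c i =>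
      (PySem.List.pyRange (i-1) n i).foldl
        (fun c j => c.setIfInBounds j.toNat (!(c.getD j.toNat false))) c) cards0
  (PySem.List.pyRange 0 n 1).foldl
    (fun ans i => if !(cards.getD i.toNat false) then ans ++ [i+1] else ans) []

-- ===== PORT B =====
-- while i * i <= n: ans.append(i * i); i += 1   (built by structural recursion on the counter)
def sqLoop (n : Int) (i : Nat) : List Int :=
  if h : (i : Int) * i ≤ n then ((i : Int) * i) :: sqLoop n (i + 1) else []
termination_by n.toNat + 1 - i
decreasing_by
  have hn : (i : Int) ≤ n := by nlinarith [Int.natCast_nonneg i]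
  have : i ≤ n.toNat := by omega
  omega

def solve_alt (n : Int) : List Int := sqLoop n 1

-- ===== PRECONDITION & SPEC =====
def Spec_solve (n : Int) (out : List Int) : Prop := out = solve_alt n
instance (n : Int) (out : List Int) : Decidable (Spec_solve n out) := by unfold Spec_solve; infer_instance

-- ===== CLAIM (what is proved, stated in full; the proofs are below) =====
def Claim_equal_solve : Prop := ∀ (n : Int), Dom_solve n → Spec_solve n (solve n)

-- ===== LEMMAS AND PROOFS =====
def flipF (c : List Bool) (j : Int) : List Bool := c.set j.toNat (!(c.getD j.toNat false))

theorem length_flipFold (l : List Int) (c : List Bool) :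
    (l.foldl flipF c).length = c.length := by
  induction l generalizing c with
  | nil => rfl
  | cons j l ih => simp [List.foldl, ih, flipF]

theorem getD_flipFold (l : List Int) (c : List Bool) (hnd : l.Nodup)
    (hb : ∀ j ∈ l, 0 ≤ j ∧ j.toNat < c.length) (k : Nat) :
    (l.foldl flipF c).getD k false =
      xor (c.getD k false) (decide ((k : Int) ∈ l)) := by
  induction l generalizing c with
  | nil => simp
  | cons j l ih =>
    have hj := hb j (by simp)
    have hnd' : l.Nodup := hnd.of_cons
    have hjl : j ∉ l := by simp at hnd; exact hnd.1
    have hb' : ∀ x ∈ l, 0 ≤ x ∧ x.toNat < (flipF c j).length := by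
      intro x hx; have := hb x (by simp [hx]); simpa [flipF] using this
    rw [List.foldl_cons, ih _ hnd' hb']
    by_cases hkj : (k : Int) = j
    · have hkj' : j.toNat = k := by omega
      have hk : k < c.length := by omega
      simp [flipF, hkj', hkj, List.getD_eq_getElem?_getD, List.getElem?_set, hk,
        List.getElem?_eq_getElem hk, hjl]
    · have hne : j.toNat ≠ k := by omega
      simp [flipF, List.getD_eq_getElem?_getD, List.getElem?_set, hne, hkj]

theorem nodup_pyRange_pos (a b : Int) {s : Int} (hs : 0 < s) :
    (PySem.List.pyRange a b s).Nodup := by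
  rw [PySem.List.pyRange_of_pos a b hs]
  refine List.Nodup.map ?_ (List.nodup_range)
  intro x y h
  have h2 : s * (x : Int) = s * y := by linarith
  have h3 := mul_left_cancel₀ (by omega : s ≠ 0) h2
  exact_mod_cast h3

theorem mem_innerRange (i n : Int) (hi : 2 ≤ i) (k : Nat) :
    ((k : Int) ∈ PySem.List.pyRange (i-1) n i) ↔ ((k : Int) < n ∧ i ∣ (k : Int) + 1) := by
  rw [PySem.List.mem_pyRange_iff_of_pos (by omega)]
  constructor
  · rintro ⟨h1, h2, c, hc⟩
    exact ⟨h2, c + 1, by rw [mul_add, mul_one]; omega⟩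
  · rintro ⟨h2, c, hc⟩
    have hc1 : 1 ≤ c := by nlinarith
    refine ⟨by nlinarith, h2, c - 1, by rw [mul_sub, mul_one]; omega⟩

theorem inner_char (i n : Int) (hi : 2 ≤ i) (c : List Bool) (hc : c.length = n.toNat) (k : Nat) :
    ((PySem.List.pyRange (i-1) n i).foldl flipF c).getD k false =
      xor (c.getD k false) (decide ((k : Int) < n ∧ i ∣ (k : Int) + 1)) := by
  rw [getD_flipFold _ _ (nodup_pyRange_pos _ _ (by omega)) ?_ k]
  · congr 1
    simp [mem_innerRange i n hi k]
  · intro j hj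
    rw [PySem.List.mem_pyRange_iff_of_pos (by omega)] at hj
    constructor
    · omega
    · omega

def Dcnt (k m : Nat) : Nat := ((Finset.Icc 2 m).filter (fun i => i ∣ (k+1))).card

def outerF (n : Int) (c : List Bool) (i : Int) : List Bool :=
  (PySem.List.pyRange (i-1) n i).foldl flipF c

theorem length_outer (n : Int) (l : List Int) (c : List Bool) :
    (l.foldl (outerF n) c).length = c.length := by
  induction l generalizing c with
  | nil => rfl
  | cons i l ih => rw [List.foldl_cons, ih]; exact length_flipFold _ _

theorem outer_char (n : Int) (hn : 1 ≤ n) (m : Nat) (hm : 1 ≤ m) (k : Nat)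
    (hk : k < n.toNat) :
    ((PySem.List.pyRange 2 ((m : Int)+1) 1).foldl (outerF n)
        (List.replicate n.toNat false)).getD k false = decide (Odd (Dcnt k m)) := by
  induction m with
  | zero => omega
  | succ m ih =>
    by_cases hm1 : 1 ≤ m
    · have hsplit : PySem.List.pyRange 2 ((m : Int) + 1 + 1) 1
          = PySem.List.pyRange 2 ((m : Int) + 1) 1 ++ [(m : Int) + 1] :=
        PySem.List.pyRange_one_succ_right (by omega)
      have hcast : ((m + 1 : Nat) : Int) + 1 = ((m : Int) + 1 + 1) := by push_cast; ring
      rw [hcast, hsplit, List.foldl_append]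
      have hlen : ((PySem.List.pyRange 2 ((m : Int)+1) 1).foldl (outerF n)
          (List.replicate n.toNat false)).length = n.toNat := by
        rw [length_outer]; simp
      rw [List.foldl_cons, List.foldl_nil]
      rw [show outerF n _ ((m : Int)+1) = (PySem.List.pyRange ((m : Int)+1-1) n ((m : Int)+1)).foldl flipF _ from rfl]
      rw [inner_char ((m : Int)+1) n (by omega) _ hlen k, ih hm1]
      have hklt : ((k : Int) < n) := by omega
      have hdvd : (((m : Int) + 1) ∣ (k : Int) + 1) ↔ ((m + 1) ∣ (k + 1)) := by
        constructor
        · intro h; exact_mod_cast h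
        · intro h; exact_mod_cast h
      have hIcc : Finset.Icc 2 (m+1) = insert (m+1) (Finset.Icc 2 m) := by
        ext x; simp [Finset.mem_Icc, Finset.mem_insert]; omega
      have hnot : (m+1) ∉ Finset.Icc 2 m := by simp
      by_cases hd : (m + 1) ∣ (k + 1)
      · have : Dcnt k (m+1) = Dcnt k m + 1 := by
          unfold Dcnt
          rw [hIcc, Finset.filter_insert, if_pos hd, Finset.card_insert_of_notMem (fun h => hnot (Finset.mem_of_mem_filter _ h))]
        rw [this]
        simp [hklt, hdvd, hd, Nat.odd_add_one, ← Nat.not_even_iff_odd]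
      · have : Dcnt k (m+1) = Dcnt k m := by
          unfold Dcnt; rw [hIcc, Finset.filter_insert, if_neg hd]
        rw [this]
        simp [hdvd, hd]
    · have hm0 : m = 0 := by omega
      subst hm0
      have h1 : PySem.List.pyRange 2 (((0:Nat) : Int) + 1 + 1) 1 = [] := by
        apply PySem.List.pyRange_one_eq_nil; norm_num
      rw [show (((0+1 : Nat)) : Int) + 1 = ((0:Nat) : Int) + 1 + 1 by norm_num, h1, List.foldl_nil]
      have h2 : Dcnt k 1 = 0 := by
        unfold Dcnt
        rw [Finset.Icc_eq_empty (by omega)]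
        simp
      simp [h2, List.getD_eq_getElem?_getD, List.getElem?_replicate, hk]

theorem odd_card_divisors_iff (m : Nat) (hm : 0 < m) :
    Odd m.divisors.card ↔ ∃ r, r * r = m := by
  classical
  set s := m.divisors.filter (fun d => d*d < m) with hs
  set t := m.divisors.filter (fun d => m < d*d) with ht
  set e := m.divisors.filter (fun d => d*d = m) with he
  have hA : s.card + (m.divisors.filter (fun d => ¬ d*d < m)).card = m.divisors.card :=
    Finset.filter_card_add_filter_neg_card_eq_card _
  have hB : ((m.divisors.filter (fun d => ¬ d*d < m)).filter (fun d => d*d = m)).card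
      + ((m.divisors.filter (fun d => ¬ d*d < m)).filter (fun d => ¬ d*d = m)).card
      = (m.divisors.filter (fun d => ¬ d*d < m)).card :=
    Finset.filter_card_add_filter_neg_card_eq_card _
  have hC : (m.divisors.filter (fun d => ¬ d*d < m)).filter (fun d => d*d = m) = e := by
    rw [Finset.filter_filter, he]
    apply Finset.filter_congr
    intro d _
    constructor
    · exact fun h => h.2
    · exact fun h => ⟨not_lt.mpr (le_of_eq h.symm), h⟩
  have hD : (m.divisors.filter (fun d => ¬ d*d < m)).filter (fun d => ¬ d*d = m) = t := by
    rw [Finset.filter_filter, ht]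
    apply Finset.filter_congr
    intro d _
    constructor
    · exact fun h => (not_lt.mp h.1).lt_of_ne (Ne.symm h.2)
    · exact fun h => ⟨not_lt.mpr h.le, h.ne'⟩
  have hsplit : m.divisors.card = s.card + e.card + t.card := by
    rw [← hA, ← hB, hC, hD]; ring
  have hst : s.card = t.card := by
    apply Finset.card_bij (fun d _ => m / d)
    · intro d hd
      rw [hs, Finset.mem_filter, Nat.mem_divisors] at hd
      obtain ⟨⟨hdvd, _⟩, hlt⟩ := hd
      have hd0 : 0 < d := Nat.pos_of_dvd_of_pos hdvd hm
      have hqd : m / d * d = m := Nat.div_mul_cancel hdvd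
      have hdq : d < m / d := by
        apply Nat.lt_of_mul_lt_mul_right (a := d)
        rw [hqd]; exact hlt
      rw [ht, Finset.mem_filter, Nat.mem_divisors]
      refine ⟨⟨Nat.div_dvd_of_dvd hdvd, by omega⟩, ?_⟩
      nlinarith
    · intro d1 h1 d2 h2 heq
      rw [hs, Finset.mem_filter, Nat.mem_divisors] at h1 h2
      have e1 := Nat.div_div_self h1.1.1 (by omega)
      have e2 := Nat.div_div_self h2.1.1 (by omega)
      rw [heq] at e1
      omega
    · intro d hd
      rw [ht, Finset.mem_filter, Nat.mem_divisors] at hd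
      obtain ⟨⟨hdvd, _⟩, hlt⟩ := hd
      have hd0 : 0 < d := Nat.pos_of_dvd_of_pos hdvd hm
      have hqd : m / d * d = m := Nat.div_mul_cancel hdvd
      have hq0 : 0 < m / d := Nat.div_pos (Nat.le_of_dvd hm hdvd) hd0
      have hqd' : m / d < d := by
        apply Nat.lt_of_mul_lt_mul_right (a := d)
        rw [hqd]; exact lt_of_lt_of_le hlt (le_refl _)
      refine ⟨m / d, ?_, Nat.div_div_self hdvd (by omega)⟩
      rw [hs, Finset.mem_filter, Nat.mem_divisors]
      refine ⟨⟨Nat.div_dvd_of_dvd hdvd, by omega⟩, ?_⟩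
      nlinarith
  have hecard : e.card = if ∃ r, r * r = m then 1 else 0 := by
    split_ifs with hsq
    · obtain ⟨r, hr⟩ := hsq
      have hr0 : 0 < r := by nlinarith
      have : e = {r} := by
        ext d
        rw [he, Finset.mem_filter, Nat.mem_divisors, Finset.mem_singleton]
        constructor
        · rintro ⟨_, hdd⟩
          have : d * d = r * r := by omega
          exact Nat.mul_self_inj.mp this
        · rintro rfl
          exact ⟨⟨⟨d, hr.symm⟩, by omega⟩, hr⟩
      rw [this, Finset.card_singleton]
    · push_neg at hsq
      have : e = ∅ := by
        ext d
        rw [he, Finset.mem_filter]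
        simp only [Finset.notMem_empty, iff_false]
        rintro ⟨_, hdd⟩
        exact hsq d hdd
      rw [this, Finset.card_empty]
  constructor
  · intro hodd
    by_contra hsq
    rw [if_neg hsq] at hecard
    obtain ⟨c, hc⟩ := hodd
    rw [hsplit, hst, hecard] at hc
    omega
  · intro hsq
    rw [if_pos hsq] at hecard
    rw [hsplit, hst, hecard]
    exact ⟨t.card, by omega⟩

theorem Dcnt_full (k N : Nat) (hk : k < N) :
    Dcnt k N = (k+1).divisors.card - 1 := by
  have hset : (Finset.Icc 2 N).filter (fun i => i ∣ (k+1)) = (k+1).divisors.erase 1 := by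
    ext d
    rw [Finset.mem_filter, Finset.mem_Icc, Finset.mem_erase, Nat.mem_divisors]
    constructor
    · rintro ⟨⟨h2, _⟩, hdvd⟩
      exact ⟨by omega, hdvd, by omega⟩
    · rintro ⟨h1, hdvd, _⟩
      have hd0 : d ≠ 0 := by rintro rfl; simp at hdvd
      have := Nat.le_of_dvd (by omega) hdvd
      exact ⟨⟨by omega, by omega⟩, hdvd⟩
  unfold Dcnt
  rw [hset, Finset.card_erase_of_mem (Nat.one_mem_divisors.mpr (by omega))]

theorem one_le_card_divisors (k : Nat) : 1 ≤ (k+1).divisors.card :=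
  Finset.card_pos.mpr ⟨1, Nat.one_mem_divisors.mpr (by omega)⟩

theorem sqrt_succ_of_sq (N : Nat) (h : (N+1).sqrt * (N+1).sqrt = N+1) :
    (N+1).sqrt = N.sqrt + 1 := by
  set s := (N+1).sqrt with hs
  have hs1 : 1 ≤ s := by nlinarith
  have h1 : N.sqrt < s := by
    rw [Nat.sqrt_lt]; omega
  have h2 : s - 1 ≤ N.sqrt := by
    rw [Nat.le_sqrt]
    obtain ⟨u, hu⟩ : ∃ u, s = u + 1 := ⟨s - 1, by omega⟩
    have h' : (u+1) * (u+1) = N + 1 := by rw [← hu]; exact h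
    rw [hu]
    simp only [Nat.add_sub_cancel]
    nlinarith
  omega

theorem sqrt_succ_of_not_sq (N : Nat) (h : ¬ (N+1).sqrt * (N+1).sqrt = N+1) :
    (N+1).sqrt = N.sqrt := by
  have hmono : N.sqrt ≤ (N+1).sqrt := Nat.sqrt_le_sqrt (by omega)
  have hle : (N+1).sqrt * (N+1).sqrt ≤ N + 1 := Nat.sqrt_le _
  rcases Nat.lt_or_ge N.sqrt ((N+1).sqrt) with hlt | hge
  · exfalso
    have : N < (N+1).sqrt * (N+1).sqrt := Nat.sqrt_lt.mp hlt
    omega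
  · omega

theorem squares_range (N : Nat) :
    ((List.range N).filter (fun k => decide ((k+1).sqrt * (k+1).sqrt = k+1))).map (fun k => k+1)
      = (List.range' 1 N.sqrt).map (fun t => t*t) := by
  induction N with
  | zero => simp
  | succ N ih =>
    rw [List.range_succ, List.filter_append, List.map_append, ih]
    by_cases h : (N+1).sqrt * (N+1).sqrt = N+1
    · rw [sqrt_succ_of_sq N h, List.range'_concat, List.map_append]
      congr 1
      simp only [List.filter_cons, List.filter_nil]
      rw [if_pos (by simpa using h)]
      simp only [List.map_cons, List.map_nil]
      have : (1 + 1 * N.sqrt) * (1 + 1 * N.sqrt) = N + 1 := by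
        have := sqrt_succ_of_sq N h
        nlinarith
    
      rw [this]
    · rw [sqrt_succ_of_not_sq N h]
      simp only [List.filter_cons, List.filter_nil]
      rw [if_neg (by simpa using h)]
      simp

theorem sqLoop_eq (n : Int) (hn : 0 ≤ n) (fuel : Nat) :
    ∀ i : Nat, 1 ≤ i → fuel = n.toNat.sqrt + 1 - i →
      sqLoop n i = (List.range' i (n.toNat.sqrt + 1 - i)).map (fun t : Nat => ((t : Int) * (t : Int))) := by
  induction fuel with
  | zero =>
    intro i hi hf
    have hgt : ¬ ((i : Int) * i ≤ n) := by
      intro hle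
      have h1 : i * i ≤ n.toNat := by
        have : ((i * i : Nat) : Int) ≤ n := by push_cast; exact hle
        omega
      have := Nat.le_sqrt.mpr h1
      omega
    rw [sqLoop, dif_neg hgt, ← hf]
    simp
  | succ fuel ih =>
    intro i hi hf
    have hle : i ≤ n.toNat.sqrt := by omega
    have hii : ((i : Int) * i ≤ n) := by
      have h1 : i * i ≤ n.toNat := Nat.le_sqrt.mp hle
      have : ((i * i : Nat) : Int) ≤ n := by omega
      push_cast at this; exact this
    rw [sqLoop, dif_pos hii, ih (i+1) (by omega) (by omega)]
    rw [show n.toNat.sqrt + 1 - i = (n.toNat.sqrt + 1 - (i+1)) + 1 by omega, List.range'_succ]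
    simp

theorem parity_flip (c : Nat) (hc : 1 ≤ c) : (!decide (Odd (c-1))) = decide (Odd c) := by
  simp only [Nat.odd_iff]
  rw [← decide_not, decide_eq_decide]
  omega


def arrFlipF (c : Array Bool) (j : Int) : Array Bool :=
  c.setIfInBounds j.toNat (!(c.getD j.toNat false))

theorem getD_toList (c : Array Bool) (k : Nat) (d : Bool) :
    c.getD k d = c.toList.getD k d := by
  rw [Array.getD_eq_getD_getElem?, List.getD_eq_getElem?_getD, Array.getElem?_toList]

theorem toList_arrFlipFold (l : List Int) (c : Array Bool) :
    (l.foldl arrFlipF c).toList = l.foldl flipF c.toList := by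
  induction l generalizing c with
  | nil => rfl
  | cons j l ih =>
    rw [List.foldl_cons, List.foldl_cons, ih]
    congr 1
    unfold arrFlipF flipF
    rw [Array.toList_setIfInBounds, getD_toList]

theorem toList_arrOuterFold (n : Int) (l : List Int) (c : Array Bool) :
    (l.foldl (fun c i => (PySem.List.pyRange (i-1) n i).foldl arrFlipF c) c).toList
      = l.foldl (outerF n) c.toList := by
  induction l generalizing c with
  | nil => rfl
  | cons i l ih =>
    rw [List.foldl_cons, List.foldl_cons, ih]
    congr 1
    exact toList_arrFlipFold _ _

theorem solve_eq_solve_alt (n : Int) : solve n = solve_alt n := by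
  have hfun : (fun (c : Array Bool) (i : Int) =>
      (PySem.List.pyRange (i-1) n i).foldl
        (fun c j => c.setIfInBounds j.toNat (!(c.getD j.toNat false))) c)
      = (fun c i => (PySem.List.pyRange (i-1) n i).foldl arrFlipF c) := rfl
  have hstep1 : solve n = ((PySem.List.pyRange 0 n 1).filter
      (fun i => !(((PySem.List.pyRange 2 (n+1) 1).foldl (outerF n)
        (List.replicate n.toNat false)).getD i.toNat false))).map (fun i => i + 1) := by
    simp only [solve, hfun]
    rw [PySem.List.foldl_append_if]
    have hbridge : ∀ (i : Int),
        (((PySem.List.pyRange 2 (n+1) 1).foldl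
            (fun c i => (PySem.List.pyRange (i-1) n i).foldl arrFlipF c)
            (Array.replicate n.toNat false)).getD i.toNat false)
          = (((PySem.List.pyRange 2 (n+1) 1).foldl (outerF n)
            (List.replicate n.toNat false)).getD i.toNat false) := by
      intro i
      rw [getD_toList, toList_arrOuterFold, Array.toList_replicate]
    simp only [hbridge]
    simp
  by_cases hn : 1 ≤ n
  · have hN : ((n.toNat : Int)) = n := by omega
    set N := n.toNat with hNdef
    rw [hstep1]
    rw [show (PySem.List.pyRange 0 n 1) = (PySem.List.pyRange 0 (N : Int) 1) by rw [hN]]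
    rw [PySem.List.pyRange_zero_natCast, List.filter_map, List.map_map]
    rw [List.filter_congr (q := fun k => decide ((k+1).sqrt * (k+1).sqrt = k+1)) ?_]
    · rw [show ((fun (i : Int) => i + 1) ∘ fun (k : Nat) => (k : Int)) = ((fun (k : Nat) => (k : Int)) ∘ (fun k => k + 1)) from by funext k; simp]
      rw [← List.map_map, squares_range N, List.map_map]
      show _ = solve_alt n
      unfold solve_alt
      rw [sqLoop_eq n (by omega) (N.sqrt + 1 - 1) 1 (le_refl 1) rfl,
        show N.sqrt + 1 - 1 = N.sqrt from by omega]
      refine List.map_congr_left ?_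
      intro t _
      simp
    · intro k hk
      rw [List.mem_range] at hk
      simp only [Function.comp]
      have htn : ((k : Int)).toNat = k := by omega
      rw [htn]
      have hfold := outer_char n hn N (by omega) k hk
      rw [show ((N : Int) + 1) = n + 1 by omega] at hfold
      rw [hfold, Dcnt_full k N hk, parity_flip _ (one_le_card_divisors k)]
      exact decide_eq_decide.mpr
        ((odd_card_divisors_iff (k+1) (by omega)).trans (Nat.exists_mul_self (k+1)))
  · have h1 : PySem.List.pyRange 2 (n+1) 1 = [] := PySem.List.pyRange_one_eq_nil (by omega)
    have h2 : PySem.List.pyRange 0 n 1 = [] := PySem.List.pyRange_one_eq_nil (by omega)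
    rw [hstep1, h2]
    unfold solve_alt
    rw [sqLoop, dif_neg (by omega)]
    rfl

-- ===== VERDICT (by name: the statement is the Claim_ definition above) =====
theorem solve_spec : Claim_equal_solve := by
  intro n _
  unfold Spec_solve
  exact solve_eq_solve_alt n
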